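-- pv_equiv track=rewrite | github.com/landian60/OpenClaw-LiveAsset | scripts/real-config.py | resolve_unique_endpoint_id
-- ===== SOURCE A (Python) =====
-- def normalize_endpoint_id(raw: str) -> str:
--     trimmed = raw.strip().lower()
--     if not trimmed:
--         return ""
--     out = []
--     last_dash = False
--     for ch in trimmed:
--         keep = ("a" <= ch <= "z") or ("0" <= ch <= "9") or ch == "-"
--         next_ch = ch if keep else "-"
--         if next_ch == "-":
--             if last_dash:
--                 continue
--             last_dash = True
--         else:
--             last_dash = False
--         out.append(next_ch)
--     return "".join(out).strip("-")
--
-- def resolve_unique_endpoint_id(requested_id: str, base_url: str, providers: dict) -> str: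
--     normalized = normalize_endpoint_id(requested_id) or "custom"
--     existing = providers.get(normalized)
--     if not isinstance(existing, dict) or not existing.get("baseUrl") or existing.get("baseUrl") == base_url:
--         return normalized
--     suffix = 2
--     while True:
--         candidate = f"{normalized}-{suffix}"
--         if candidate not in providers:
--             return candidate
--         suffix += 1
-- ===== SOURCE B (Python) =====
-- import re
--
-- def resolve_unique_endpoint_id(requested_id: str, base_url: str, providers: dict) -> str:
--     # normalize: the slug is just the maximal alphanumeric runs joined by single dashes
--     parts = re.findall(r'[a-z0-9]+', requested_id.strip().lower())
--     normalized = "-".join(parts) or "custom"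
--     bu = providers.get(normalized, {}).get("baseUrl")
--     if not bu or bu == base_url:
--         return normalized
--     suffix = 2
--     while True:
--         candidate = f"{normalized}-{suffix}"
--         if candidate not in providers:
--             return candidate
--         suffix += 1
-- ===== Notes on version B (the rewrite author's own statement) =====
-- stated objective: simpler
-- what changed: normalize_endpoint_id's char-by-char state machine (keep/replace each char, suppress consecutive dashes via a last_dash flag, then strip('-')) is replaced by extracting the maximal [a-z0-9] runs with re.findall and joining them with '-'; the custom fallback and the suffix-probe loop are kept.
import Mathlib
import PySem

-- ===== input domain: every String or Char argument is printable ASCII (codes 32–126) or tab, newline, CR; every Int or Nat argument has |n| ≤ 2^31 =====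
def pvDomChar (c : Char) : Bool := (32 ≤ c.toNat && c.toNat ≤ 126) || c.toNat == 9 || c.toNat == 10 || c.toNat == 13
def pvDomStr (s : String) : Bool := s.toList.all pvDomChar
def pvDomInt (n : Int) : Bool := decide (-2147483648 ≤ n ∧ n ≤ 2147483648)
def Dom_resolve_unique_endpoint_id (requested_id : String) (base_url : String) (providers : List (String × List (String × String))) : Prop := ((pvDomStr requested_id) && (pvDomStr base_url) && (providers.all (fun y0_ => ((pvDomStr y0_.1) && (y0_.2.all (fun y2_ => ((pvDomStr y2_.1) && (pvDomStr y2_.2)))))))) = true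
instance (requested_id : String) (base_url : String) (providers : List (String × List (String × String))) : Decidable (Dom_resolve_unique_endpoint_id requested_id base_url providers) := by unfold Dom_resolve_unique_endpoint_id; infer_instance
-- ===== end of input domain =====

-- B rewrites the char-by-char last_dash state machine of normalize_endpoint_id as
-- "extract the maximal alphanumeric runs and join them with '-'" (re.findall in Python);
-- objective: simpler. The suffix-probe loop is kept (ported with a fuel bound that the
-- Python loop never exceeds: among providers.length+1 distinct candidates one is free).

-- ===== PORT A =====
-- normalize_endpoint_id's for-loop over trimmed, with state (out, last_dash)
def pvNormLoop : List Char → Bool → List Char → List Char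
  | [], _, out => out
  | c :: rest, lastDash, out =>
    let keep := (decide ('a' ≤ c) && decide (c ≤ 'z')) || (decide ('0' ≤ c) && decide (c ≤ '9')) || (c == '-')
    let nextCh := if keep then c else '-'
    if nextCh == '-' then
      if lastDash then pvNormLoop rest lastDash out
      else pvNormLoop rest true (out ++ [nextCh])
    else pvNormLoop rest false (out ++ [nextCh])

def normalize_endpoint_id (raw : String) : String :=
  let trimmed := PySem.Chars.lower (PySem.Chars.strip raw.toList)
  if trimmed = [] then ""
  else String.ofList (PySem.Chars.stripChars (pvNormLoop trimmed false []) ['-'])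

-- the 'while True' probe; fuel = providers.length + 1 only makes it total (the Python
-- loop finds a free candidate within that many steps: the candidates are distinct)
def pvProbeA (providers : List (String × List (String × String))) (normalized : List Char) : Nat → Int → String
  | 0, suffix => String.ofList (normalized ++ '-' :: PySem.Int.toChars suffix)
  | fuel + 1, suffix =>
    let candidate := String.ofList (normalized ++ '-' :: PySem.Int.toChars suffix)
    if (PySem.Dict.mk providers).contains candidate then
      pvProbeA providers normalized fuel (suffix + 1)
    else candidate

def resolve_unique_endpoint_id (requested_id : String) (base_url : String) (providers : List (String × List (String × String))) : String :=
  let n := normalize_endpoint_id requested_id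
  let normalized := if n = "" then "custom" else n
  match (PySem.Dict.mk providers).get? normalized with
  | none => normalized      -- existing is None: not a dict
  | some existing =>
    let bu := (PySem.Dict.mk existing).get? "baseUrl"
    if bu = none ∨ bu = some "" ∨ bu = some base_url then normalized
    else pvProbeA providers normalized.toList (providers.length + 1) 2

-- ===== PORT B =====
def pvAlnum (c : Char) : Bool := (decide ('a' ≤ c) && decide (c ≤ 'z')) || (decide ('0' ≤ c) && decide (c ≤ '9'))

-- re.findall(r'[a-z0-9]+', s): the maximal runs of [a-z0-9] chars, left to right (exact
-- hand port of this single pattern)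
def pvRuns : List Char → List (List Char)
  | [] => []
  | c :: rest =>
    if pvAlnum c then (c :: rest.takeWhile pvAlnum) :: pvRuns (rest.dropWhile pvAlnum)
    else pvRuns rest
termination_by cs => cs.length
decreasing_by
  · have := List.length_dropWhile_le pvAlnum rest; simp; omega
  · simp

-- B's 'while True' probe (same loop as A's Python), fuel-bounded the same way
def pvProbeB (providers : List (String × List (String × String))) (normalized : List Char) : Nat → Int → String
  | 0, suffix => String.ofList (normalized ++ '-' :: PySem.Int.toChars suffix)
  | fuel + 1, suffix =>
    let candidate := String.ofList (normalized ++ '-' :: PySem.Int.toChars suffix)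
    if (PySem.Dict.mk providers).contains candidate then
      pvProbeB providers normalized fuel (suffix + 1)
    else candidate

def resolve_unique_endpoint_id_alt (requested_id : String) (base_url : String) (providers : List (String × List (String × String))) : String :=
  let parts := pvRuns (PySem.Chars.lower (PySem.Chars.strip requested_id.toList))
  let j := PySem.Chars.join ['-'] parts
  let normalized := if j = [] then "custom" else String.ofList j
  let bu := (PySem.Dict.mk (((PySem.Dict.mk providers).get? normalized).getD [])).get? "baseUrl"
  if bu = none ∨ bu = some "" ∨ bu = some base_url then normalized
  else pvProbeB providers normalized.toList (providers.length + 1) 2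

-- ===== PRECONDITION & SPEC =====
def Spec_resolve_unique_endpoint_id (requested_id : String) (base_url : String) (providers : List (String × List (String × String))) (out : String) : Prop := out = resolve_unique_endpoint_id_alt requested_id base_url providers
instance (requested_id : String) (base_url : String) (providers : List (String × List (String × String))) (out : String) : Decidable (Spec_resolve_unique_endpoint_id requested_id base_url providers out) := by unfold Spec_resolve_unique_endpoint_id; infer_instance

-- ===== CLAIM (what is proved, stated in full; the proofs are below) =====
def Claim_equal_resolve_unique_endpoint_id : Prop := ∀ (requested_id : String) (base_url : String) (providers : List (String × List (String × String))), Dom_resolve_unique_endpoint_id requested_id base_url providers → Spec_resolve_unique_endpoint_id requested_id base_url providers (resolve_unique_endpoint_id requested_id base_url providers)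

-- ===== LEMMAS AND PROOFS =====

-- the state machine of A's loop, without the output accumulator
def pvCollapse : List Char → Bool → List Char
  | [], _ => []
  | c :: rest, ld =>
    if pvAlnum c then c :: pvCollapse rest false
    else if ld then pvCollapse rest ld else '-' :: pvCollapse rest true
lemma pvAlnum_ne_dash {c : Char} (h : pvAlnum c = true) : ¬ (c = '-') := by
  rintro rfl; simp [pvAlnum] at h
lemma pvNormLoop_eq_collapse (cs : List Char) : ∀ ld out, pvNormLoop cs ld out = out ++ pvCollapse cs ld := by
  induction cs with
  | nil => intro ld out; simp [pvNormLoop, pvCollapse]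
  | cons c rest ih =>
    intro ld out
    cases hg : pvAlnum c with
    | true =>
      have hp : ('a' ≤ c ∧ c ≤ 'z') ∨ ('0' ≤ c ∧ c ≤ '9') := by simpa [pvAlnum] using hg
      have hne : ¬ (c = '-') := pvAlnum_ne_dash hg
      simp [pvNormLoop, pvCollapse, hg, hp, hne, ih]
    | false =>
      have hp : ¬ (('a' ≤ c ∧ c ≤ 'z') ∨ ('0' ≤ c ∧ c ≤ '9')) := by simpa [pvAlnum] using hg
      cases ld <;> simp [pvNormLoop, pvCollapse, hg, hp, ih]

-- pvNorm_eq chain: A's collapsed+stripped output is exactly '-'-joined alnum runs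
def pvDash (c : Char) : Bool := decide (c = '-')
def pvRstrip (x : List Char) : List Char := (List.dropWhile pvDash x.reverse).reverse

lemma pvRstrip_append {a b : List Char} (h : pvRstrip b ≠ []) : pvRstrip (a ++ b) = a ++ pvRstrip b := by
  have hb : (List.dropWhile pvDash b.reverse).isEmpty = false := by
    rw [List.isEmpty_eq_false_iff]
    intro hnil; apply h; simp [pvRstrip, hnil]
  simp only [pvRstrip, List.reverse_append, List.dropWhile_append, hb]
  simp

lemma pvRstrip_alnum {y : List Char} (h : ∀ x ∈ y, pvAlnum x = true) : pvRstrip y = y := by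
  have hd : List.dropWhile pvDash y.reverse = y.reverse := by
    cases hy : y.reverse with
    | nil => simp
    | cons c r =>
      have hc : c ∈ y := by
        have : c ∈ y.reverse := by rw [hy]; exact List.mem_cons_self
        simpa using this
      have hcd : pvDash c = false := by
        simpa [pvDash] using pvAlnum_ne_dash (h c hc)
      simp [hcd]
  simp [pvRstrip, hd]

lemma pvCollapse_true_head (cs : List Char) : pvCollapse cs true = [] ∨ ∃ c r, pvCollapse cs true = c :: r ∧ pvAlnum c = true := by
  induction cs with
  | nil => left; rfl
  | cons c rest ih =>
    cases hg : pvAlnum c with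
    | true => right; exact ⟨c, pvCollapse rest false, by simp [pvCollapse, hg], hg⟩
    | false => simpa [pvCollapse, hg] using ih

lemma pvCollapse_good_append (t : List Char) (d : List Char) (h : ∀ c ∈ t, pvAlnum c = true) :
    pvCollapse (t ++ d) false = t ++ pvCollapse d false := by
  induction t with
  | nil => simp
  | cons c r ih =>
    have hc := h c (by simp)
    simp [pvCollapse, hc, ih (fun x hx => h x (by simp [hx]))]

lemma pvRuns_ne_nil (cs : List Char) : [] ∉ pvRuns cs := by
  induction cs using pvRuns.induct with
  | case1 => simp [pvRuns]
  | case2 c rest hg ih => simp [pvRuns, hg]; exact ih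
  | case3 c rest hg ih => simpa [pvRuns, hg] using ih

lemma pvJoin_ne_nil {rs : List (List Char)} (h0 : [] ∉ rs) (h : rs ≠ []) :
    PySem.Chars.join ['-'] rs ≠ [] := by
  match rs with
  | [a] =>
    rw [PySem.Chars.join_singleton]
    intro ha; exact h0 (by simp [ha])
  | a :: b :: bs =>
    rw [PySem.Chars.join_cons_cons]
    have ha : a ≠ [] := fun ha => h0 (by simp [ha])
    cases a with
    | nil => exact absurd rfl ha
    | cons x xs => simp

lemma pvRstrip_append_dash (y : List Char) : pvRstrip (y ++ ['-']) = pvRstrip y := by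
  simp [pvRstrip, pvDash]

lemma pvDropWhile_collapse_true (cs : List Char) :
    List.dropWhile pvDash (pvCollapse cs true) = pvCollapse cs true := by
  rcases pvCollapse_true_head cs with h | ⟨c, r, h, hg⟩
  · simp [h]
  · rw [h, List.dropWhile_cons]
    have : pvDash c = false := by simpa [pvDash] using pvAlnum_ne_dash hg
    simp [this]

lemma pvRstrip_collapse (cs : List Char) : pvRstrip (pvCollapse cs true) = PySem.Chars.join ['-'] (pvRuns cs) := by
  induction cs using pvRuns.induct with
  | case1 => simp [pvCollapse, pvRuns, PySem.Chars.join, pvRstrip, List.intercalate]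
  | case2 c rest hg ih =>
    have ht : ∀ x ∈ rest.takeWhile pvAlnum, pvAlnum x = true := fun x hx => List.mem_takeWhile_imp hx
    have hsplit : rest.takeWhile pvAlnum ++ rest.dropWhile pvAlnum = rest := List.takeWhile_append_dropWhile
    have hc1 : pvCollapse (c :: rest) true = c :: (rest.takeWhile pvAlnum ++ pvCollapse (rest.dropWhile pvAlnum) false) := by
      conv_lhs => rw [pvCollapse, if_pos hg, ← hsplit]
      rw [pvCollapse_good_append _ _ ht]
    have hruns : pvRuns (c :: rest) = (c :: rest.takeWhile pvAlnum) :: pvRuns (rest.dropWhile pvAlnum) := by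
      rw [pvRuns, if_pos hg]
    cases hd : rest.dropWhile pvAlnum with
    | nil =>
      rw [hc1, hd, hruns, hd]
      simp only [pvCollapse, List.append_nil]
      rw [show pvRuns ([] : List Char) = [] from by simp [pvRuns], PySem.Chars.join_singleton]
      exact pvRstrip_alnum (by intro x hx; rcases List.mem_cons.1 hx with rfl | hx; exact hg; exact ht x hx)
    | cons e d' =>
      have he : pvAlnum e = false := by
        have := List.head?_dropWhile_not pvAlnum rest
        rw [hd] at this; simpa using this
      have hcd : pvCollapse (rest.dropWhile pvAlnum) false = '-' :: pvCollapse d' true := by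
        rw [hd, pvCollapse, if_neg (by simp [he])]; simp
      have hct : pvCollapse (rest.dropWhile pvAlnum) true = pvCollapse d' true := by
        rw [hd, pvCollapse, if_neg (by simp [he])]; simp
      have hrd : pvRuns (rest.dropWhile pvAlnum) = pvRuns d' := by
        rw [hd, pvRuns, if_neg (by simp [he])]
      rw [hct] at ih
      cases hr : pvRuns d' with
      | nil =>
        have hnil : pvCollapse d' true = [] := by
          rcases pvCollapse_true_head d' with h | ⟨c0, r0, h0, hg0⟩
          · exact h
          · exfalso
            rw [h0, hrd, hr] at ih
            simp [PySem.Chars.join, List.intercalate, pvRstrip] at ih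
            have hcd0 : pvDash c0 = true := ih c0 (Or.inr rfl)
            simp [pvDash] at hcd0
            exact pvAlnum_ne_dash hg0 hcd0
        rw [hc1, hcd, hnil, hruns, hrd, hr]
        rw [PySem.Chars.join_singleton]
        have : c :: (rest.takeWhile pvAlnum ++ ['-']) = (c :: rest.takeWhile pvAlnum) ++ ['-'] := by simp
        rw [this, pvRstrip_append_dash]
        exact pvRstrip_alnum (by intro x hx; rcases List.mem_cons.1 hx with rfl | hx; exact hg; exact ht x hx)
      | cons b bs =>
        have hjne : PySem.Chars.join ['-'] (pvRuns d') ≠ [] :=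
          pvJoin_ne_nil (pvRuns_ne_nil d') (by rw [hr]; simp)
        have hne : pvRstrip (pvCollapse d' true) ≠ [] := by
          rw [ih, hrd]; exact hjne
        rw [hc1, hcd, hruns, hrd, hr]
        have harr : c :: (rest.takeWhile pvAlnum ++ '-' :: pvCollapse d' true)
            = (c :: rest.takeWhile pvAlnum ++ ['-']) ++ pvCollapse d' true := by simp
        rw [harr, pvRstrip_append hne, ih, hrd, hr]
        rw [PySem.Chars.join_cons_cons]
  | case3 c rest hg ih =>
    have h1 : pvCollapse (c :: rest) true = pvCollapse rest true := by
      rw [pvCollapse, if_neg (by simp [hg])]; simp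
    have h2 : pvRuns (c :: rest) = pvRuns rest := by
      rw [pvRuns, if_neg (by simp [hg])]
    rw [h1, h2]; exact ih

lemma pvContains_eq_dash : (fun c => List.contains ['-'] c) = pvDash := by
  funext c
  by_cases h : c = '-'
  · subst h; decide
  · have h' : ¬ '-' = c := fun e => h e.symm
    have h1 : pvDash c = false := by simp [pvDash, h]
    have h2 : List.contains ['-'] c = false := by simpa using h
    rw [h1, h2]

lemma pvLstrip_collapse (cs : List Char) :
    List.dropWhile pvDash (pvCollapse cs false) = pvCollapse cs true := by
  cases cs with
  | nil => rfl
  | cons c rest =>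
    cases hg : pvAlnum c with
    | true =>
      have h1 : pvCollapse (c :: rest) false = c :: pvCollapse rest false := by simp [pvCollapse, hg]
      have h2 : pvCollapse (c :: rest) true = c :: pvCollapse rest false := by simp [pvCollapse, hg]
      have hdc : pvDash c = false := by simpa [pvDash] using pvAlnum_ne_dash hg
      rw [h1, h2, List.dropWhile_cons, hdc]
      simp
    | false =>
      have h1 : pvCollapse (c :: rest) false = '-' :: pvCollapse rest true := by simp [pvCollapse, hg]
      have h2 : pvCollapse (c :: rest) true = pvCollapse rest true := by simp [pvCollapse, hg]
      rw [h1, h2, List.dropWhile_cons, show pvDash '-' = true from by simp [pvDash]]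
      simp only [if_true]
      exact pvDropWhile_collapse_true rest

lemma pvStrip_collapse (cs : List Char) :
    PySem.Chars.stripChars (pvCollapse cs false) ['-'] = PySem.Chars.join ['-'] (pvRuns cs) := by
  show (List.dropWhile _ (List.dropWhile _ (pvCollapse cs false)).reverse).reverse = _
  rw [show (fun c => List.contains ['-'] c) = pvDash from pvContains_eq_dash]
  rw [pvLstrip_collapse]
  exact pvRstrip_collapse cs

lemma pvNorm_eq (cs : List Char) :
    PySem.Chars.stripChars (pvNormLoop cs false []) ['-'] = PySem.Chars.join ['-'] (pvRuns cs) := by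
  rw [pvNormLoop_eq_collapse, List.nil_append, pvStrip_collapse]

lemma pvProbe_eq (providers : List (String × List (String × String))) (normalized : List Char) :
    ∀ fuel suffix, pvProbeB providers normalized fuel suffix = pvProbeA providers normalized fuel suffix := by
  intro fuel
  induction fuel with
  | zero => intro s; rfl
  | succ n ih => intro s; simp only [pvProbeA, pvProbeB, ih]

lemma pvOfList_eq_empty_iff (l : List Char) : String.ofList l = "" ↔ l = [] := by
  constructor
  · intro h
    have := congrArg String.toList h
    simpa using this
  · rintro rfl; rfl

lemma pvNormalized_eq (rid : String) :
    (if normalize_endpoint_id rid = "" then "custom" else normalize_endpoint_id rid)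
      = (if PySem.Chars.join ['-'] (pvRuns (PySem.Chars.lower (PySem.Chars.strip rid.toList))) = [] then "custom"
         else String.ofList (PySem.Chars.join ['-'] (pvRuns (PySem.Chars.lower (PySem.Chars.strip rid.toList))))) := by
  unfold normalize_endpoint_id
  by_cases hcs : PySem.Chars.lower (PySem.Chars.strip rid.toList) = []
  · rw [hcs]
    simp [pvRuns, PySem.Chars.join, List.intercalate]
  · simp only [if_neg hcs, pvNorm_eq]
    by_cases hj : PySem.Chars.join ['-'] (pvRuns (PySem.Chars.lower (PySem.Chars.strip rid.toList))) = []
    · rw [if_pos hj, if_pos ((pvOfList_eq_empty_iff _).2 hj)]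
    · rw [if_neg hj, if_neg (fun h => hj ((pvOfList_eq_empty_iff _).1 h))]

-- ===== VERDICT (by name: the statement is the Claim_ definition above) =====
theorem resolve_unique_endpoint_id_spec : Claim_equal_resolve_unique_endpoint_id := by
  intro rid base providers _
  show resolve_unique_endpoint_id rid base providers = resolve_unique_endpoint_id_alt rid base providers
  unfold resolve_unique_endpoint_id resolve_unique_endpoint_id_alt
  simp only [pvNormalized_eq]
  cases hq : (PySem.Dict.mk providers).get?
      (if PySem.Chars.join ['-'] (pvRuns (PySem.Chars.lower (PySem.Chars.strip rid.toList))) = [] then "custom"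
       else String.ofList (PySem.Chars.join ['-'] (pvRuns (PySem.Chars.lower (PySem.Chars.strip rid.toList))))) with
  | none =>
    simp only [Option.getD_none]
    have hmt : (PySem.Dict.mk ([] : List (String × String))).get? "baseUrl" = none := rfl
    simp [hmt]
  | some ex =>
    simp only [Option.getD_some]
    split_ifs <;> simp [pvProbe_eq]
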